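-- pv_equiv track=rewrite | github.com/z80rotom/pokeemerald | pytools/tutor_learnsets_json/tutor_learnsets.py | convert_sections
-- ===== SOURCE A (Python) =====
-- SCAN_DEFINE = "#define"
--
-- SCAN_COMMENT = "//"
--
-- SCAN_EVOS = "static const u32 sTutorLearnsets[] ="
--
-- SCAN_ARRAY_START = "{"
--
-- SCAN_ARRAY_END = "};"
--
-- def convert_sections(in_lines):
--     out_lines = []
--
--     lines = []
--     in_evos = False
--     in_array = False
--     for line in in_lines:
--         line = line.strip()
--         if line.startswith(SCAN_DEFINE):
--             continue
--         if line.startswith(SCAN_COMMENT):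
--             continue
--         if line.startswith(SCAN_EVOS):
--             in_evos = True
--             continue
--
--         # Need to double check we're not in array so we don't mistake
--         # an evolution entry as an outer array scan token
--         if in_evos and not in_array and line.startswith(SCAN_ARRAY_START):
--             in_array = True
--             continue
--
--         if not in_array:
--             continue
--
--         if line.startswith(SCAN_ARRAY_END):
--             in_array = False
--             in_evos = False
--             break
--         lines.append(line)
--     return '\n'.join(lines)
-- ===== SOURCE B (Python) =====
-- SCAN_DEFINE = "#define"
-- SCAN_COMMENT = "//"
-- SCAN_EVOS = "static const u32 sTutorLearnsets[] ="
-- SCAN_ARRAY_START = "{"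
-- SCAN_ARRAY_END = "};"
--
-- def convert_sections(in_lines):
--     # Three sequential phases over one shared iterator instead of a flag state machine.
--     it = iter(in_lines)
--     # Phase 1: advance past the sTutorLearnsets declaration line.
--     for line in it:
--         if line.strip().startswith(SCAN_EVOS):
--             break
--     # Phase 2: advance past the opening brace of the array.
--     for line in it:
--         if line.strip().startswith(SCAN_ARRAY_START):
--             break
--     # Phase 3: collect body lines until the closing '};'.
--     body = []
--     for line in it:
--         line = line.strip()
--         if line.startswith(SCAN_ARRAY_END):
--             break
--         if not (line.startswith(SCAN_DEFINE) or line.startswith(SCAN_COMMENT)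
--                 or line.startswith(SCAN_EVOS)):
--             body.append(line)
--     return '\n'.join(body)
-- ===== Notes on version B (the rewrite author's own statement) =====
-- stated objective: simpler
-- what changed: Replaces A's single loop with in_evos/in_array boolean flags by three sequential phase loops over one shared iterator (find declaration, find opening brace, collect until '};').
import Mathlib
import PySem

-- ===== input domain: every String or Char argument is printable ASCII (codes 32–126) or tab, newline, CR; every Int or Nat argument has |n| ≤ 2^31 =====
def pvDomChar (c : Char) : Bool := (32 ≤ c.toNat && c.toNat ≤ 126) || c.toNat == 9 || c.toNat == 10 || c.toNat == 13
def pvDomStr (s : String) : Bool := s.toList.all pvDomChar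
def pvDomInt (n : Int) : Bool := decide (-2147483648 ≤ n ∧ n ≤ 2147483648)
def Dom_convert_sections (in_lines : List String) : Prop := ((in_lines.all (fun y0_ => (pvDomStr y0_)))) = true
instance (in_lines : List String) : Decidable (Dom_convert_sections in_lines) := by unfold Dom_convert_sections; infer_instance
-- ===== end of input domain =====

-- B replaces A's boolean-flag state machine by three sequential phase loops (simpler decomposition, same cost).

-- ===== PORT A =====
-- A's single for-loop with in_evos/in_array flags and break; break returns the accumulator.
def pvA_loop : List String → List String → Bool → Bool → List String
  | [], lines, _, _ => lines
  | l :: rest, lines, in_evos, in_array =>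
    let line := PySem.Str.strip l
    if PySem.Str.startswith line "#define" then pvA_loop rest lines in_evos in_array
    else if PySem.Str.startswith line "//" then pvA_loop rest lines in_evos in_array
    else if PySem.Str.startswith line "static const u32 sTutorLearnsets[] =" then
      pvA_loop rest lines true in_array
    else if in_evos && !in_array && PySem.Str.startswith line "{" then
      pvA_loop rest lines in_evos true
    else if !in_array then pvA_loop rest lines in_evos in_array
    else if PySem.Str.startswith line "};" then lines          -- break
    else pvA_loop rest (lines ++ [line]) in_evos in_array

def convert_sections (in_lines : List String) : String :=
  PySem.Str.join "\n" (pvA_loop in_lines [] false false)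

-- ===== PORT B =====
-- Phase 1: drop lines up to and including the sTutorLearnsets declaration.
def pvB_findEvos : List String → List String
  | [] => []
  | l :: r =>
    if PySem.Str.startswith (PySem.Str.strip l) "static const u32 sTutorLearnsets[] =" then r
    else pvB_findEvos r

-- Phase 2: drop lines up to and including the opening brace.
def pvB_findBrace : List String → List String
  | [] => []
  | l :: r =>
    if PySem.Str.startswith (PySem.Str.strip l) "{" then r
    else pvB_findBrace r

-- Phase 3: collect stripped body lines until '};', filtering defines/comments/declarations.
def pvB_collect : List String → List String
  | [] => []
  | l :: r =>
    let line := PySem.Str.strip l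
    if PySem.Str.startswith line "};" then []
    else if !(PySem.Str.startswith line "#define" || PySem.Str.startswith line "//" ||
              PySem.Str.startswith line "static const u32 sTutorLearnsets[] =") then
      line :: pvB_collect r
    else pvB_collect r

def convert_sections_alt (in_lines : List String) : String :=
  PySem.Str.join "\n" (pvB_collect (pvB_findBrace (pvB_findEvos in_lines)))

-- ===== PRECONDITION & SPEC =====
def Spec_convert_sections (in_lines : List String) (out : String) : Prop := out = convert_sections_alt in_lines
instance (in_lines : List String) (out : String) : Decidable (Spec_convert_sections in_lines out) := by unfold Spec_convert_sections; infer_instance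

-- ===== CLAIM (what is proved, stated in full; the proofs are below) =====
def Claim_equal_convert_sections : Prop := ∀ (in_lines : List String), Dom_convert_sections in_lines → Spec_convert_sections in_lines (convert_sections in_lines)

-- ===== LEMMAS AND PROOFS =====

-- two scan tokens with different first characters cannot both be prefixes
theorem pv_sw_excl (s : String) (a b : Char) (p q : List Char)
    (hab : a ≠ b)
    (h : PySem.Chars.startswith s.toList (a :: p) = true) :
    PySem.Chars.startswith s.toList (b :: q) = false := by
  cases hq : PySem.Chars.startswith s.toList (b :: q) with
  | false => rfl
  | true =>
    rw [PySem.Chars.startswith_iff] at h hq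
    obtain ⟨t, ht⟩ := h
    obtain ⟨u, hu⟩ := hq
    rw [← ht] at hu
    simp [List.cons_append] at hu
    exact absurd hu.1.symm hab

theorem pvL3 (ls : List String) (acc : List String) :
    pvA_loop ls acc true true = acc ++ pvB_collect ls := by
  induction ls generalizing acc with
  | nil => simp [pvA_loop, pvB_collect]
  | cons l r ih =>
    simp only [pvA_loop, pvB_collect]
    set s := PySem.Str.strip l with hs
    by_cases hend : PySem.Str.startswith s "};" = true
    · have h1 := pv_sw_excl s '}' '#' [';'] "define".toList (by decide) (by simpa using hend)
      have h2 := pv_sw_excl s '}' '/' [';'] "/".toList (by decide) (by simpa using hend)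
      have h3 := pv_sw_excl s '}' 's' [';'] "tatic const u32 sTutorLearnsets[] =".toList (by decide) (by simpa using hend)
      simp at hend h1 h2 h3
      simp [hend, h1, h2, h3]
    · by_cases h1 : PySem.Str.startswith s "#define" = true
      · simp at hend h1; simp [hend, h1, ih]
      · by_cases h2 : PySem.Str.startswith s "//" = true
        · simp at hend h1 h2; simp [hend, h1, h2, ih]
        · by_cases h3 : PySem.Str.startswith s "static const u32 sTutorLearnsets[] =" = true
          · simp at hend h1 h2 h3; simp [hend, h1, h2, h3, ih]
          · simp at hend h1 h2 h3; simp [hend, h1, h2, h3, ih, List.append_assoc]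

theorem pvL2 (ls : List String) (acc : List String) :
    pvA_loop ls acc true false = acc ++ pvB_collect (pvB_findBrace ls) := by
  induction ls generalizing acc with
  | nil => simp [pvA_loop, pvB_findBrace, pvB_collect]
  | cons l r ih =>
    simp only [pvA_loop, pvB_findBrace]
    set s := PySem.Str.strip l with hs
    by_cases hbr : PySem.Str.startswith s "{" = true
    · have h1 := pv_sw_excl s '{' '#' [] "define".toList (by decide) (by simpa using hbr)
      have h2 := pv_sw_excl s '{' '/' [] "/".toList (by decide) (by simpa using hbr)
      have h3 := pv_sw_excl s '{' 's' [] "tatic const u32 sTutorLearnsets[] =".toList (by decide) (by simpa using hbr)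
      simp at hbr h1 h2 h3
      simp [hbr, h1, h2, h3, pvL3]
    · by_cases h1 : PySem.Str.startswith s "#define" = true
      · simp at hbr h1; simp [hbr, h1, ih]
      · by_cases h2 : PySem.Str.startswith s "//" = true
        · simp at hbr h1 h2; simp [hbr, h1, h2, ih]
        · by_cases h3 : PySem.Str.startswith s "static const u32 sTutorLearnsets[] =" = true
          · simp at hbr h1 h2 h3; simp [hbr, h1, h2, h3, ih]
          · simp at hbr h1 h2 h3; simp [hbr, h1, h2, h3, ih]

theorem pvL1 (ls : List String) (acc : List String) :
    pvA_loop ls acc false false = acc ++ pvB_collect (pvB_findBrace (pvB_findEvos ls)) := by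
  induction ls generalizing acc with
  | nil => simp [pvA_loop, pvB_findEvos, pvB_findBrace, pvB_collect]
  | cons l r ih =>
    simp only [pvA_loop, pvB_findEvos]
    set s := PySem.Str.strip l with hs
    by_cases hev : PySem.Str.startswith s "static const u32 sTutorLearnsets[] =" = true
    · have h1 := pv_sw_excl s 's' '#' "tatic const u32 sTutorLearnsets[] =".toList "define".toList (by decide) (by simpa using hev)
      have h2 := pv_sw_excl s 's' '/' "tatic const u32 sTutorLearnsets[] =".toList "/".toList (by decide) (by simpa using hev)
      simp at hev h1 h2
      simp [hev, h1, h2, pvL2]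
    · by_cases h1 : PySem.Str.startswith s "#define" = true
      · simp at hev h1; simp [hev, h1, ih]
      · by_cases h2 : PySem.Str.startswith s "//" = true
        · simp at hev h1 h2; simp [hev, h1, h2, ih]
        · simp at hev h1 h2; simp [hev, h1, h2, ih]

-- ===== VERDICT (by name: the statement is the Claim_ definition above) =====
theorem convert_sections_spec : Claim_equal_convert_sections := by
  intro in_lines _
  show convert_sections in_lines = convert_sections_alt in_lines
  unfold convert_sections convert_sections_alt
  rw [pvL1]
  rfl
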